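-- pv_equiv track=rewrite | github.com/mylonics/KiAssist | python-lib/kiassist_utils/context/project_context.py | _ref_sort_key
-- ===== SOURCE A (Python) =====
-- from typing import Any, Dict, List, Optional, Set, Tuple
--
-- def _ref_sort_key(ref: str) -> Tuple[str, int]:
--     """Sort key for reference designators: prefix alphabetically, number numerically."""
--     prefix = ""
--     num_str = ""
--     for ch in ref:
--         if ch.isdigit():
--             num_str += ch
--         else:
--             if num_str:
--                 break
--             prefix += ch
--     return (prefix, int(num_str) if num_str else 0)
-- ===== SOURCE B (Python) =====
-- def _ref_sort_key(ref: str):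
--     """Sort key via boundary indices: advance two cursors over the string and
--     slice, instead of accumulating characters into growing strings."""
--     n = len(ref)
--     i = 0
--     while i < n and not ref[i].isdigit():
--         i += 1
--     j = i
--     while j < n and ref[j].isdigit():
--         j += 1
--     return (ref[:i], int(ref[i:j]) if j > i else 0)
-- ===== Notes on version B (the rewrite author's own statement) =====
-- stated objective: alternative
-- what changed: Replaces A's single stateful accumulation loop (two growing strings and a break flag) by a two-pointer index scan: advance cursor i past the non-digit prefix, cursor j past the digit run, then return slices ref[:i] and int(ref[i:j]); no per-character string concatenation.
import Mathlib
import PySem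

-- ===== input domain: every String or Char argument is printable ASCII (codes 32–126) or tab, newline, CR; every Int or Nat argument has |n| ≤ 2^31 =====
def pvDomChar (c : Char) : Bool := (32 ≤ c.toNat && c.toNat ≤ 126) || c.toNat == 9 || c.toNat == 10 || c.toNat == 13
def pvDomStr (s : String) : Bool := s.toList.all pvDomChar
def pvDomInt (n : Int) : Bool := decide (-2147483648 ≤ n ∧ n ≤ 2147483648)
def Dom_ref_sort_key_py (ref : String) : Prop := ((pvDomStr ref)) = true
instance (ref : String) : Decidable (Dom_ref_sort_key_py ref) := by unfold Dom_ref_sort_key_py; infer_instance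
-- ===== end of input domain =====

-- B replaces A's accumulation loop (two growing strings, break flag) by a
-- two-pointer index scan that returns slices; objective: alternative, same value.

-- ===== PORT A =====
-- A's for-loop with break, as structural recursion over the characters with
-- the same state (prefix, num_str); returning early models `break`.
def refLoopA : List Char → List Char → List Char → List Char × List Char
  | [], pre, num => (pre, num)
  | c :: rest, pre, num =>
    if PySem.Chars.isdigit c then refLoopA rest pre (num ++ [c])
    else if num ≠ [] then (pre, num)
    else refLoopA rest (pre ++ [c]) num

def ref_sort_key_py (ref : String) : String × Int :=
  let r := refLoopA ref.toList [] []
  -- `int(num_str)` on the collected digit run never raises; PySem.Int.ofChars? is exact there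
  (String.ofList r.1, if r.2 ≠ [] then (PySem.Int.ofChars? r.2).getD 0 else 0)

-- ===== PORT B =====
-- Source B's `while i < n and pred(ref[i]): i += 1`, as recursion on the cursor.
def bScan (l : List Char) (pred : Char → Bool) (i : Nat) : Nat :=
  if h : i < l.length then
    if pred l[i] then bScan l pred (i + 1) else i
  else i
termination_by l.length - i

def ref_sort_key_py_alt (ref : String) : String × Int :=
  let l := ref.toList
  let i := bScan l (fun c => !PySem.Chars.isdigit c) 0
  let j := bScan l PySem.Chars.isdigit i
  -- ref[:i] and ref[i:j] with 0 ≤ i ≤ j ≤ n: Python slicing is exactly take/drop here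
  (String.ofList (l.take i), if j > i then (PySem.Int.ofChars? ((l.drop i).take (j - i))).getD 0 else 0)

-- ===== PRECONDITION & SPEC =====
def Spec_ref_sort_key_py (ref : String) (out : String × Int) : Prop := out = ref_sort_key_py_alt ref
instance (ref : String) (out : String × Int) : Decidable (Spec_ref_sort_key_py ref out) := by unfold Spec_ref_sort_key_py; infer_instance

-- ===== CLAIM =====
def Claim_equal_ref_sort_key_py : Prop := ∀ (ref : String), Dom_ref_sort_key_py ref → Spec_ref_sort_key_py ref (ref_sort_key_py ref)

-- ===== LEMMAS AND PROOFS =====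

-- B's cursor loop stops at i plus the length of the leading run of `pred` in l.drop i.
theorem bScan_eq (l : List Char) (pred : Char → Bool) :
    ∀ i, bScan l pred i = i + ((l.drop i).takeWhile pred).length := by
  intro i
  induction hn : l.length - i using Nat.strong_induction_on generalizing i with
  | _ n ih =>
    rw [bScan]
    by_cases hi : i < l.length
    · have hd : l.drop i = l[i] :: l.drop (i + 1) := List.drop_eq_getElem_cons hi
      rw [dif_pos hi]
      by_cases hp : pred l[i] = true
      · rw [if_pos hp, ih (l.length - (i + 1)) (by omega) (i + 1) rfl,
          hd, List.takeWhile_cons_of_pos hp, List.length_cons]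
        omega
      · rw [if_neg hp, hd, List.takeWhile_cons_of_neg hp]
        simp
    · rw [dif_neg hi]
      simp [List.drop_eq_nil_of_le (by omega : l.length ≤ i)]

-- Once a digit has been seen, A's loop appends the remaining leading digit run and stops.
theorem refLoopA_digits (l : List Char) : ∀ pre num, num ≠ [] →
    refLoopA l pre num = (pre, num ++ l.takeWhile PySem.Chars.isdigit) := by
  induction l with
  | nil => intro pre num h; simp [refLoopA]
  | cons c rest ih =>
    intro pre num h
    by_cases hd : PySem.Chars.isdigit c
    · simp [refLoopA, hd, ih pre (num ++ [c]) (by simp)]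
    · simp [refLoopA, hd, h]

-- Before any digit, A's loop computes the non-digit prefix run and the digit run after it.
theorem refLoopA_prefix (l : List Char) : ∀ pre,
    refLoopA l pre [] =
      (pre ++ l.takeWhile (fun c => !PySem.Chars.isdigit c),
       (l.drop (l.takeWhile (fun c => !PySem.Chars.isdigit c)).length).takeWhile PySem.Chars.isdigit) := by
  induction l with
  | nil => intro pre; simp [refLoopA]
  | cons c rest ih =>
    intro pre
    by_cases hd : PySem.Chars.isdigit c
    · simp [refLoopA, hd, refLoopA_digits rest pre [c] (by simp)]
    · simp [refLoopA, hd, ih (pre ++ [c])]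

-- take of the takeWhile length gives the takeWhile prefix.
theorem take_takeWhile_length (l : List Char) (p : Char → Bool) :
    l.take (l.takeWhile p).length = l.takeWhile p := by
  induction l with
  | nil => simp
  | cons c rest ih =>
    by_cases hp : p c
    · simp [hp, ih]
    · simp [hp]

-- ===== VERDICT =====
theorem ref_sort_key_py_spec : Claim_equal_ref_sort_key_py := by
  intro ref _
  unfold Spec_ref_sort_key_py ref_sort_key_py ref_sort_key_py_alt
  simp only [refLoopA_prefix, List.nil_append]
  have hi2 : bScan ref.toList (fun c => !PySem.Chars.isdigit c) 0
      = (ref.toList.takeWhile (fun c => !PySem.Chars.isdigit c)).length := by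
    simpa using bScan_eq ref.toList (fun c => !PySem.Chars.isdigit c) 0
  rw [hi2, bScan_eq, take_takeWhile_length, Nat.add_sub_cancel_left, take_takeWhile_length]
  by_cases hne : ((ref.toList.drop
      (ref.toList.takeWhile (fun c => !PySem.Chars.isdigit c)).length).takeWhile
      PySem.Chars.isdigit) = []
  · simp [hne]
  · have hlen := List.length_pos_iff.mpr hne
    simp [hne, Nat.lt_add_of_pos_right hlen]
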